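-- pv_equiv track=rewrite | github.com/riszkymf/pricefinder_full | API_CRAWLER/crawler/module/extractors.py | post_process_kwargs
-- ===== SOURCE A (Python) =====
-- def post_process_kwargs(data):
--     d = {}
--     if isinstance(data, dict):
--         for key, val in data.items():
--             d['type_'] = key
--             d = {**d, **data}
--     else:
--         raise TypeError("YAML Configuration must be list of dictionary")
--     return d
-- ===== SOURCE B (Python) =====
-- def post_process_kwargs(data):
--     if not isinstance(data, dict):
--         raise TypeError("YAML Configuration must be list of dictionary")
--     last_key = next(reversed(data), None)
--     if last_key is None:
--         return {}
--     return {'type_': last_key, **data}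
-- ===== Notes on version B (the rewrite author's own statement) =====
-- stated objective: simpler
-- what changed: Replaces the quadratic loop that re-merges the whole dict on every key with a single closed-form construction {'type_': last_key, **data} using the last key, after an explicit empty-dict check.
import Mathlib
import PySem

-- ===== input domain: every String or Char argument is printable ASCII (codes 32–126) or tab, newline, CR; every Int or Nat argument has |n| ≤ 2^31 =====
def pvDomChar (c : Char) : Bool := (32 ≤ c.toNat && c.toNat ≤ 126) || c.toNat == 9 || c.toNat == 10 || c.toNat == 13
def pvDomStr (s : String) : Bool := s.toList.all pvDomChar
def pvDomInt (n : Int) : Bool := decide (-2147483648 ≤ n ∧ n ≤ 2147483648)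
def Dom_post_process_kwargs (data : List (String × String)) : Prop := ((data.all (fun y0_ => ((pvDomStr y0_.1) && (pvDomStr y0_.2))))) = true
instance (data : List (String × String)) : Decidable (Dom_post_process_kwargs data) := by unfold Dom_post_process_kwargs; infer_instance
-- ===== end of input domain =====

-- B replaces A's quadratic loop (re-merging the whole dict for every key) with the
-- closed-form construction {'type_': last_key, **data} after an empty-dict check; same return value.

-- ===== PORT A =====
-- A: d = {}; for key, val in data.items(): d['type_'] = key; d = {**d, **data}; return d
def post_process_kwargs (data : List (String × String)) : List (String × String) :=
  (data.foldl
    (fun d p =>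
      -- d['type_'] = key
      let d1 := d.insert "type_" p.1
      -- d = {**d, **data}  (a fresh dict: insert d's items, then data's items)
      data.foldl (fun m q => m.insert q.1 q.2)
        (d1.items.foldl (fun m q => m.insert q.1 q.2) PySem.Dict.empty))
    (PySem.Dict.empty : PySem.Dict String String)).items

-- ===== PORT B =====
-- B: last_key = next(reversed(data), None); if None: return {}; return {'type_': last_key, **data}
def post_process_kwargs_alt (data : List (String × String)) : List (String × String) :=
  match data.reverse with
  | [] => []
  | (k, _) :: _ =>
    (data.foldl (fun m q => m.insert q.1 q.2)
      ((PySem.Dict.empty : PySem.Dict String String).insert "type_" k)).items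

-- ===== PRECONDITION & SPEC =====
def Spec_post_process_kwargs (data : List (String × String)) (out : List (String × String)) : Prop := out = post_process_kwargs_alt data
instance (data : List (String × String)) (out : List (String × String)) : Decidable (Spec_post_process_kwargs data out) := by unfold Spec_post_process_kwargs; infer_instance

-- ===== CLAIM (what is proved, stated in full; the proofs are below) =====
def Claim_equal_post_process_kwargs : Prop := ∀ (data : List (String × String)), Dom_post_process_kwargs data → Spec_post_process_kwargs data (post_process_kwargs data)

-- ===== LEMMAS AND PROOFS =====

-- merging a list of pairs into a dict (the '**data' part of both ports)
def pvMrg (ds : List (String × String)) (d : PySem.Dict String String) : PySem.Dict String String :=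
  ds.foldl (fun m q => m.insert q.1 q.2) d

-- the dict both programs converge to, for a given candidate 'type_' key
def pvD (ds : List (String × String)) (k : String) : PySem.Dict String String :=
  pvMrg ds (PySem.Dict.empty.insert "type_" k)

theorem pvMrg_get?_not_mem (ds : List (String × String)) (d : PySem.Dict String String)
    (x : String) (hx : x ∉ ds.map Prod.fst) : (pvMrg ds d).get? x = d.get? x := by
  induction ds generalizing d with
  | nil => rfl
  | cons q tl ih =>
    simp only [List.map_cons, List.mem_cons, not_or] at hx
    simp only [pvMrg, List.foldl_cons] at *
    rw [ih _ hx.2, PySem.Dict.get?_insert_of_ne _ _ hx.1]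

theorem pvMrg_get?_congr (ds : List (String × String)) (d1 d2 : PySem.Dict String String)
    (h : ∀ x, x ∈ ds.map Prod.fst ∨ d1.get? x = d2.get? x) :
    ∀ x, (pvMrg ds d1).get? x = (pvMrg ds d2).get? x := by
  induction ds generalizing d1 d2 with
  | nil =>
    intro x
    rcases h x with h' | h'
    · simp at h'
    · exact h'
  | cons q tl ih =>
    simp only [pvMrg, List.foldl_cons] at *
    refine ih _ _ (fun x => ?_)
    by_cases hx : x ∈ tl.map Prod.fst
    · exact Or.inl hx
    · right
      rw [PySem.Dict.get?_insert, PySem.Dict.get?_insert]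
      split_ifs with he
      · rfl
      · rcases h x with h' | h'
        · simp only [List.map_cons, List.mem_cons] at h'
          rcases h' with h' | h' <;> [exact absurd h' he; exact absurd h' hx]
        · exact h'

theorem pvDict_ext (d1 d2 : PySem.Dict String String)
    (h1 : d1.keys.Nodup) (h2 : d2.keys.Nodup) (hk : d1.keys = d2.keys)
    (hg : ∀ x, d1.get? x = d2.get? x) : d1 = d2 := by
  apply PySem.Dict.ext
  rw [PySem.Dict.items_eq_map_keys d1 h1 "", PySem.Dict.items_eq_map_keys d2 h2 "", hk]
  exact List.map_congr_left (fun k _ => by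
    rw [PySem.Dict.getD_eq_get?_getD, PySem.Dict.getD_eq_get?_getD, hg k])

theorem pvMrg_keys (ds : List (String × String)) (d : PySem.Dict String String) :
    (pvMrg ds d).keys = PySem.Set.update d.keys (ds.map Prod.fst) :=
  PySem.Dict.keys_foldl_insert_key ds Prod.fst (fun _ q => q.2) d

theorem pvMrg_nodup (ds : List (String × String)) (d : PySem.Dict String String)
    (h : d.keys.Nodup) : (pvMrg ds d).keys.Nodup :=
  PySem.Dict.nodup_keys_foldl_insert_key ds Prod.fst (fun _ q => q.2) d h

theorem pvD_nodup (ds : List (String × String)) (k : String) : (pvD ds k).keys.Nodup :=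
  pvMrg_nodup ds _ (PySem.Dict.nodup_keys_insert _ _ _ PySem.Dict.nodup_keys_empty)

theorem pvD_keys (ds : List (String × String)) (k k' : String) :
    (pvD ds k).keys = (pvD ds k').keys := by
  simp only [pvD, pvMrg_keys]
  have : ∀ j : String, ((PySem.Dict.empty : PySem.Dict String String).insert "type_" j).keys = ["type_"] := by
    intro j; rfl
  rw [this k, this k']

theorem pvD_get?_type (ds : List (String × String)) (k : String)
    (h : "type_" ∉ ds.map Prod.fst) : (pvD ds k).get? "type_" = some k := by
  rw [pvD, pvMrg_get?_not_mem _ _ _ h, PySem.Dict.get?_insert_self]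

theorem pvD_get?_other (ds : List (String × String)) (k x : String)
    (hx : x ∉ ds.map Prod.fst) (hne : x ≠ "type_") : (pvD ds k).get? x = none := by
  rw [pvD, pvMrg_get?_not_mem _ _ _ hx, PySem.Dict.get?_insert_of_ne _ _ hne,
    PySem.Dict.get?_empty]

theorem pvD_type_mem (ds : List (String × String)) (k : String) :
    "type_" ∈ (pvD ds k).keys := by
  simp only [pvD, pvMrg_keys]
  rw [PySem.Set.mem_update]
  exact Or.inl (List.mem_singleton.mpr rfl)

-- reinserting the items of a duplicate-free dict into a fresh dict reproduces it
theorem pvReinsert (d : PySem.Dict String String) (h : d.keys.Nodup) :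
    d.items.foldl (fun m q => m.insert q.1 q.2) PySem.Dict.empty = d := by
  apply PySem.Dict.ext
  have := PySem.Dict.items_foldl_insert_fresh d.items Prod.fst Prod.snd
    (PySem.Dict.empty : PySem.Dict String String)
    (fun a _ => by rfl) (by simpa [PySem.Dict.keys] using h)
  simpa using this

-- merging 'data' twice is merging it once
theorem pvMrg_idem (ds : List (String × String)) (d : PySem.Dict String String)
    (h : d.keys.Nodup) : pvMrg ds (pvMrg ds d) = pvMrg ds d := by
  refine pvDict_ext _ _ (pvMrg_nodup _ _ (pvMrg_nodup _ _ h)) (pvMrg_nodup _ _ h) ?_ ?_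
  · rw [pvMrg_keys, pvMrg_keys]
    rw [PySem.Set.update_eq_append_filter (PySem.Set.update d.keys (ds.map Prod.fst)) (ds.map Prod.fst)]
    have : (PySem.Set.ofList (ds.map Prod.fst)).filter
        (fun y => !(PySem.Set.update d.keys (ds.map Prod.fst)).contains y) = [] := by
      rw [List.filter_eq_nil_iff]
      intro a ha
      have ha' : a ∈ ds.map Prod.fst := (PySem.List.mem_dedup _ _).mp (by simpa using ha)
      simp only [Bool.not_eq_true', Bool.not_eq_false]
      exact (PySem.Set.contains_iff _ _).mpr ((PySem.Set.mem_update _ _ _).mpr (Or.inr ha'))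
    rw [this, List.append_nil]
  · exact pvMrg_get?_congr ds _ _ (fun x => by
      by_cases hx : x ∈ ds.map Prod.fst
      · exact Or.inl hx
      · exact Or.inr (pvMrg_get?_not_mem ds d x hx))

-- one iteration of A's loop sends pvD k' to pvD (the new key)
theorem pvStep (ds : List (String × String)) (k' k : String) :
    pvMrg ds ((pvD ds k').insert "type_" k) = pvD ds k := by
  have hins : ((pvD ds k').insert "type_" k).keys.Nodup :=
    PySem.Dict.nodup_keys_insert _ _ _ (pvD_nodup ds k')
  have hidem : pvD ds k = pvMrg ds (pvD ds k) :=
    (pvMrg_idem ds _ (PySem.Dict.nodup_keys_insert _ _ _ PySem.Dict.nodup_keys_empty)).symm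
  rw [hidem]
  refine pvDict_ext _ _ (pvMrg_nodup _ _ hins) (pvMrg_nodup _ _ (pvD_nodup ds k)) ?_ ?_
  · rw [pvMrg_keys, pvMrg_keys,
      PySem.Dict.keys_insert_of_contains _ _
        ((PySem.Dict.contains_iff_mem_keys _ _).mpr (pvD_type_mem ds k')),
      pvD_keys ds k' k]
  · refine pvMrg_get?_congr ds _ _ (fun x => ?_)
    by_cases hx : x ∈ ds.map Prod.fst
    · exact Or.inl hx
    · right
      by_cases he : x = "type_"
      · subst he
        rw [PySem.Dict.get?_insert_self, pvD_get?_type ds k hx]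
      · rw [PySem.Dict.get?_insert_of_ne _ _ he,
          pvD_get?_other ds k' x hx he, pvD_get?_other ds k x hx he]

-- A's whole loop, started from pvD k', lands on pvD (last key, defaulting to k')
theorem pvLoop (ds : List (String × String)) :
    ∀ (rest : List (String × String)) (k' : String),
      rest.foldl
        (fun d p =>
          ds.foldl (fun m q => m.insert q.1 q.2)
            (((d.insert "type_" p.1)).items.foldl (fun m q => m.insert q.1 q.2) PySem.Dict.empty))
        (pvD ds k')
      = pvD ds (((rest.reverse.head?).map Prod.fst).getD k') := by
  intro rest
  induction rest with
  | nil => intro k'; rfl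
  | cons p tl ih =>
    intro k'
    have hstep :
        ds.foldl (fun m q => m.insert q.1 q.2)
          ((((pvD ds k').insert "type_" p.1)).items.foldl (fun m q => m.insert q.1 q.2) PySem.Dict.empty)
        = pvD ds p.1 := by
      rw [pvReinsert _ (PySem.Dict.nodup_keys_insert _ _ _ (pvD_nodup ds k'))]
      exact pvStep ds k' p.1
    rw [List.foldl_cons, hstep, ih p.1]
    congr 1
    rcases h : tl.reverse with _ | ⟨q, r⟩
    · simp [h]
    · simp [h]

-- ===== VERDICT (by name: the statement is the Claim_ definition above) =====
theorem post_process_kwargs_spec : Claim_equal_post_process_kwargs := by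
  intro data _
  show post_process_kwargs data = post_process_kwargs_alt data
  rcases data with _ | ⟨p, tl⟩
  · rfl
  · have hfirst :
        ((p :: tl).foldl (fun m q => m.insert q.1 q.2)
          ((((PySem.Dict.empty : PySem.Dict String String).insert "type_" p.1)).items.foldl
            (fun m q => m.insert q.1 q.2) PySem.Dict.empty))
        = pvD (p :: tl) p.1 := by
      rw [pvReinsert _ (PySem.Dict.nodup_keys_insert _ _ _ PySem.Dict.nodup_keys_empty)]
      rfl
    have hA : post_process_kwargs (p :: tl)
        = (pvD (p :: tl) (((tl.reverse.head?).map Prod.fst).getD p.1)).items := by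
      unfold post_process_kwargs
      rw [List.foldl_cons, hfirst, pvLoop (p :: tl) tl p.1]
    rw [hA]
    unfold post_process_kwargs_alt
    rcases h : tl.reverse with _ | ⟨q, r⟩
    · have htl : tl = [] := by simpa using congrArg List.reverse h
      subst htl
      rfl
    · have hrev : (p :: tl).reverse = q :: (r ++ [p]) := by
        rw [List.reverse_cons, h, List.cons_append]
      rw [hrev]
      simp only [List.head?_cons, Option.map_some, Option.getD_some]
      rfl
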